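-- pv_equiv track=rewrite | github.com/fedora-llvm-team/clang-built-fedora-status | copr-reporter/html_generator.py | get_combined_build_state
-- ===== SOURCE A (Python) =====
-- def get_combined_build_state(chroots):
--     state = None
--     for c in chroots:
--         chroot = chroots[c]
--         if chroot['state'] == 'failed':
--             state = 'failed'
--             break
--         if chroot['state'] == 'succeeded':
--             state = 'succeeded'
--             continue
--         if chroot['state'] == 'missing':
--             if not state:
--                 state = 'missing'
--             continue
--     return 'failed' if not state else state
-- ===== SOURCE B (Python) =====
-- def collect_states(chroots):
--     """All state strings up to (excluding) the first 'failed' chroot;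
--     None if a 'failed' chroot is hit (later entries never read)."""
--     states = []
--     for c in chroots:
--         s = chroots[c]['state']
--         if s == 'failed':
--             return None
--         states.append(s)
--     return states
--
--
-- def get_combined_build_state(chroots):
--     states = collect_states(chroots)
--     if states is None:
--         return 'failed'
--     if 'succeeded' in states:
--         return 'succeeded'
--     if 'missing' in states:
--         return 'missing'
--     return 'failed'
-- ===== Notes on version B (the rewrite author's own statement) =====
-- stated objective: simpler
-- what changed: Replaces A's inline running-state overwrite logic by a two-stage collect-then-decide decomposition: a helper first gathers the state strings up to the first 'failed' chroot (returning None when one is hit, preserving the early exit), then a separate priority step resolves succeeded > missing > failed over the collected list.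
import Mathlib
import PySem

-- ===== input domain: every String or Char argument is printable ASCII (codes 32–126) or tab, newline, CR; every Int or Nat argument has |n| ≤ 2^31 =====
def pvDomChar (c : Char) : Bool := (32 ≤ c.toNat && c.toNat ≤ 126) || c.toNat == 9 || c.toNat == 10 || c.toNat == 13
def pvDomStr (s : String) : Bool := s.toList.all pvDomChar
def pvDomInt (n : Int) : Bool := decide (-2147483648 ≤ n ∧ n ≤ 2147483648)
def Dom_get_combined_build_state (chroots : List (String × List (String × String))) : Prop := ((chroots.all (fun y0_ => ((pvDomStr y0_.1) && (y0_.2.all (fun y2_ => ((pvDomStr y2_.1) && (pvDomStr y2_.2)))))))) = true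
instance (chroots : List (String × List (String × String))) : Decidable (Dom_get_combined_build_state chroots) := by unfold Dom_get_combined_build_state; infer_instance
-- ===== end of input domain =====

-- B replaces A's running-state overwrite logic by a two-stage collect-then-decide
-- decomposition (objective: simpler). Equivalence is about the return value on Pre_.

-- ===== PORT A =====
-- Python truthiness of the Option String variable `state` ('not state')
def pvNotState (st : Option String) : Bool := st.getD "" = ""

-- the for-loop of A: `state` threaded; `break` on 'failed' returns the final expression at once
def pvLoopA (chroots : List (String × List (String × String))) :
    Option String → List (String × List (String × String)) → String
  | st, [] => if pvNotState st then "failed" else st.getD ""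
  | st, (c, _) :: rest =>
    match (PySem.Dict.mk chroots).get? c with
    | none => ""          -- KeyError chroots[c]: unreachable, c is a key of chroots
    | some chroot =>
      match (PySem.Dict.mk chroot).get? "state" with
      | none => ""        -- KeyError chroot['state']: excluded by Pre_
      | some s =>
        if s = "failed" then "failed"                      -- state = 'failed'; break → return
        else if s = "succeeded" then pvLoopA chroots (some "succeeded") rest
        else if s = "missing" then
          pvLoopA chroots (if pvNotState st then some "missing" else st) rest
        else pvLoopA chroots st rest

def get_combined_build_state (chroots : List (String × List (String × String))) : String :=
  pvLoopA chroots none chroots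

-- ===== PORT B =====
-- B's helper collect_states: the accumulated `states` list, or none once a 'failed' state is hit
def pvCollectStates (chroots : List (String × List (String × String))) :
    List String → List (String × List (String × String)) → Option (List String)
  | states, [] => some states
  | states, (c, _) :: rest =>
    match (PySem.Dict.mk chroots).get? c with
    | none => none        -- KeyError chroots[c]: unreachable, c is a key of chroots
    | some chroot =>
      match (PySem.Dict.mk chroot).get? "state" with
      | none => none      -- KeyError chroot['state']: excluded by Pre_
      | some s =>
        if s = "failed" then none
        else pvCollectStates chroots (states ++ [s]) rest

def get_combined_build_state_alt (chroots : List (String × List (String × String))) : String :=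
  match pvCollectStates chroots [] chroots with
  | none => "failed"
  | some states =>
    if states.contains "succeeded" then "succeeded"
    else if states.contains "missing" then "missing"
    else "failed"

-- ===== PRECONDITION & SPEC =====
-- the state A reads for one chroot entry (chroots[c]['state'], none = KeyError)
def pvStateOf (chroots : List (String × List (String × String)))
    (p : String × List (String × String)) : Option String :=
  ((PySem.Dict.mk chroots).get? p.1).bind (fun d => (PySem.Dict.mk d).get? "state")

-- Pre_ excludes exactly the inputs where A raises KeyError on chroot['state']: every chroot up
-- to and including the first 'failed' one (A breaks there, so later entries are never read)
-- must carry a 'state' key.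
def Pre_get_combined_build_state (chroots : List (String × List (String × String))) : Prop :=
  ∀ p ∈ chroots.takeWhile (fun q => pvStateOf chroots q != some "failed"),
    (pvStateOf chroots p).isSome = true
instance (chroots : List (String × List (String × String))) : Decidable (Pre_get_combined_build_state chroots) := by unfold Pre_get_combined_build_state; infer_instance

def pvWitness_get_combined_build_state : (List (String × List (String × String))) :=
  [("x86_64", [("state", "succeeded")]), ("aarch64", [("state", "missing")])]

def Spec_get_combined_build_state (chroots : List (String × List (String × String))) (out : String) : Prop := out = get_combined_build_state_alt chroots
instance (chroots : List (String × List (String × String))) (out : String) : Decidable (Spec_get_combined_build_state chroots out) := by unfold Spec_get_combined_build_state; infer_instance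

-- ===== CLAIM (what is proved, stated in full; the proofs are below) =====
def Claim_equal_get_combined_build_state : Prop := ∀ (chroots : List (String × List (String × String))), Dom_get_combined_build_state chroots → Pre_get_combined_build_state chroots → Spec_get_combined_build_state chroots (get_combined_build_state chroots)

-- ===== LEMMAS AND PROOFS =====

-- A's running state is determined by the list of states B has collected so far
def pvResolve (states : List String) : Option String :=
  if states.contains "succeeded" then some "succeeded"
  else if states.contains "missing" then some "missing"
  else none

-- B's post-loop priority resolution, applied to the helper's result
def pvDecide (r : Option (List String)) : String :=
  match r with
  | none => "failed"
  | some states =>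
    if states.contains "succeeded" then "succeeded"
    else if states.contains "missing" then "missing"
    else "failed"

lemma pvResolve_snoc (states : List String) (s : String)
    (hf : s ≠ "succeeded") (hm : s ≠ "missing") :
    pvResolve (states ++ [s]) = pvResolve states := by
  simp only [pvResolve]
  simp [List.contains_eq_mem, hf.symm, hm.symm]

lemma pvResolve_snoc_succ (states : List String) :
    pvResolve (states ++ ["succeeded"]) = some "succeeded" := by
  simp [pvResolve, List.contains_eq_mem]

lemma pvLoop_eq (chroots : List (String × List (String × String)))
    (rest : List (String × List (String × String))) (st : Option String) (states : List String)
    (hrel : st = pvResolve states)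
    (hpre : ∀ p ∈ rest.takeWhile (fun q => pvStateOf chroots q != some "failed"),
      (pvStateOf chroots p).isSome = true) :
    pvLoopA chroots st rest = pvDecide (pvCollectStates chroots states rest) := by
  induction rest generalizing st states with
  | nil =>
    subst hrel
    simp only [pvLoopA, pvCollectStates, pvDecide, pvResolve, pvNotState]
    split_ifs with h1 h2 <;> simp_all [Option.getD]
  | cons p rest ih =>
    obtain ⟨c, inner⟩ := p
    by_cases hfail : pvStateOf chroots (c, inner) = some "failed"
    · -- the first failed chroot: A breaks with 'failed', B's helper returns none
      simp only [pvStateOf] at hfail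
      cases hlk : (PySem.Dict.mk chroots).get? c with
      | none => simp [hlk] at hfail
      | some chroot =>
        rw [hlk] at hfail
        simp only [Option.bind_some] at hfail
        simp [pvLoopA, pvCollectStates, pvDecide, hlk, hfail]
    · have hfp : (pvStateOf chroots (c, inner) != some "failed") = true := by
        simpa using hfail
      rw [List.takeWhile_cons, hfp, if_pos rfl] at hpre
      have hp := hpre ⟨c, inner⟩ (by simp)
      have hrest : ∀ q ∈ rest.takeWhile (fun q => pvStateOf chroots q != some "failed"),
          (pvStateOf chroots q).isSome = true := fun q hq => hpre q (List.mem_cons_of_mem _ hq)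
      simp only [pvLoopA, pvCollectStates, pvStateOf] at *
      cases hlk : (PySem.Dict.mk chroots).get? c with
      | none => simp [hlk] at hp
      | some chroot =>
        rw [hlk] at hfail
        simp only [Option.bind_some] at hfail
        cases hst : (PySem.Dict.mk chroot).get? "state" with
        | none => simp [hlk, hst] at hp
        | some s =>
          simp only [hst]
          have hf : s ≠ "failed" := by rw [hst] at hfail; simpa using hfail
          simp only [hf, if_false]
          by_cases hsu : s = "succeeded"
          · subst hsu
            exact ih (some "succeeded") (states ++ ["succeeded"])
              (pvResolve_snoc_succ states).symm hrest
          · simp only [hsu, if_false]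
            by_cases hmi : s = "missing"
            · subst hmi
              refine ih _ (states ++ ["missing"]) ?_ hrest
              subst hrel
              simp only [pvResolve, pvNotState, List.contains_eq_mem, List.mem_append,
                decide_eq_true_eq]
              split_ifs <;> simp_all [Option.getD]
            · simp only [hmi, if_false]
              exact ih st (states ++ [s])
                (by rw [pvResolve_snoc states s hsu hmi]; exact hrel) hrest

-- ===== VERDICT (by name: the statement is the Claim_ definition above) =====
theorem get_combined_build_state_spec : Claim_equal_get_combined_build_state := by
  intro chroots _ hpre
  show get_combined_build_state chroots = get_combined_build_state_alt chroots
  have h := pvLoop_eq chroots chroots none [] (by simp [pvResolve]) hpre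
  simp only [get_combined_build_state, get_combined_build_state_alt, h, pvDecide]
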